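-- pv_equiv track=rewrite | github.com/Count-group/project1 | results/codes/算法竞赛/kimi/CF2066B_1.py | max_magical_subsequence
-- ===== SOURCE A (Python) =====
-- def find_mex(arr):
--     mex = 0
--     while mex in arr:
--         mex += 1
--     return mex
--
-- def max_magical_subsequence(arr):
--     n = len(arr)
--     used = set()
--     subseq = []
--     mex = find_mex(arr)
--
--     for i in range(n):
--         if arr[i] >= mex and arr[i] not in used:
--             subseq.append(arr[i])
--             used.add(arr[i])
--             mex = find_mex([x for x in arr if x not in used])
--
--     return len(subseq)
-- ===== SOURCE B (Python) =====
-- def max_magical_subsequence(arr):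
--     s = set(arr)
--     mex = 0
--     while mex in s:
--         mex += 1
--     return sum(1 for v in s if v > mex)
-- ===== Notes on version B (the rewrite author's own statement) =====
-- stated objective: faster
-- what changed: B observes that the mex never changes during A's greedy loop (only values > mex are ever removed), so it computes the mex once from the value set and returns the count of distinct values above it, eliminating A's repeated list rescans and mex recomputations.
import Mathlib
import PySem

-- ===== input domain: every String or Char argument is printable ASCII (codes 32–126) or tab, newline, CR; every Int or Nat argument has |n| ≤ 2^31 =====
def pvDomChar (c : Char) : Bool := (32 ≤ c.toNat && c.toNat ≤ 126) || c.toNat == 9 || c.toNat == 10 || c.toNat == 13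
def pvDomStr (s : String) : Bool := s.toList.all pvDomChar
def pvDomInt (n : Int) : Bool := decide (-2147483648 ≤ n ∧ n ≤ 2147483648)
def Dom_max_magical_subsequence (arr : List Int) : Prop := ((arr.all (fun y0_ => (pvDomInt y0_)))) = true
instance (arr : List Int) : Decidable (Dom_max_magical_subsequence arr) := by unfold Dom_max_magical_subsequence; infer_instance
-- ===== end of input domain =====

-- B computes the mex of the value set once (it never changes during A's loop, since only
-- values above it are removed) and returns the count of distinct values above it; faster.

-- ===== PORT A =====
-- 'while mex in arr: mex += 1' (fuel arr.length+1 only makes the loop total; it is proved sufficient below)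
def findMexAux (arr : List Int) : Nat → Int → Int
  | 0, mex => mex
  | f+1, mex => if mex ∈ arr then findMexAux arr f (mex + 1) else mex

def find_mex (arr : List Int) : Int := findMexAux arr (arr.length + 1) 0

-- one iteration of A's for-loop; state = (used, subseq, mex)
def aStep (arr : List Int) (st : PySem.Set Int × List Int × Int) (x : Int) :
    PySem.Set Int × List Int × Int :=
  if st.2.2 ≤ x ∧ x ∉ st.1 then
    let used' := PySem.Set.add st.1 x
    (used', st.2.1 ++ [x], find_mex (arr.filter (fun y => decide (y ∉ used'))))
  else st

def max_magical_subsequence (arr : List Int) : Int :=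
  let st := arr.foldl (aStep arr) (PySem.Set.empty, [], find_mex arr)
  (st.2.1.length : Int)

-- ===== PORT B =====
-- 'while mex in s: mex += 1' over the value set (same fuel convention)
def altMexLoop (s : List Int) : Nat → Int → Int
  | 0, mex => mex
  | f+1, mex => if mex ∈ s then altMexLoop s f (mex + 1) else mex

def max_magical_subsequence_alt (arr : List Int) : Int :=
  let s : PySem.Set Int := PySem.Set.ofList arr
  let mex := altMexLoop s (s.length + 1) 0
  ((s.countP (fun v => decide (mex < v)) : Nat) : Int)

-- ===== PRECONDITION & SPEC =====
def Spec_max_magical_subsequence (arr : List Int) (out : Int) : Prop := out = max_magical_subsequence_alt arr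
instance (arr : List Int) (out : Int) : Decidable (Spec_max_magical_subsequence arr out) := by unfold Spec_max_magical_subsequence; infer_instance

-- ===== CLAIM (what is proved, stated in full; the proofs are below) =====
def Claim_equal_max_magical_subsequence : Prop := ∀ (arr : List Int), Dom_max_magical_subsequence arr → Spec_max_magical_subsequence arr (max_magical_subsequence arr)

-- ===== LEMMAS AND PROOFS =====

theorem altMexLoop_eq (s : List Int) (f : Nat) (mex : Int) :
    altMexLoop s f mex = findMexAux s f mex := by
  induction f generalizing mex with
  | zero => rfl
  | succ f ih => simp [altMexLoop, findMexAux, ih]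

-- the fuelled loop returns the least m ≥ mex missing from L, provided fuel reaches it
theorem findMexAux_eq (L : List Int) (f : Nat) (mex m : Int)
    (h1 : mex ≤ m) (h2 : m ∉ L) (hlow : ∀ k, mex ≤ k → k < m → k ∈ L)
    (hf : m < mex + f) : findMexAux L f mex = m := by
  induction f generalizing mex with
  | zero => omega
  | succ f ih =>
    by_cases hm : mex ∈ L
    · simp only [findMexAux, if_pos hm]
      exact ih (mex + 1) (by rcases lt_or_eq_of_le h1 with h | h; · omega
                             · exact absurd hm (h ▸ h2))
        (fun k hk1 hk2 => hlow k (by omega) hk2) (by omega)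
    · have hmx : mex = m := by
        by_contra h
        exact hm (hlow mex le_rfl (by omega))
      subst hmx
      simp [findMexAux, hm]

-- if every nonnegative integer below m is in L, then m.toNat ≤ L.length (pigeonhole)
theorem range_le_length (L : List Int) (m : Int) (h0 : 0 ≤ m)
    (h : ∀ k : Int, 0 ≤ k → k < m → k ∈ L) : m.toNat ≤ L.length := by
  have hsub : PySem.List.pyRange 0 m 1 ⊆ L := by
    intro x hx
    rw [PySem.List.mem_pyRange_one] at hx
    exact h x hx.1 hx.2
  have hnd : (PySem.List.pyRange 0 m 1).Nodup := PySem.List.nodup_pyRange_one 0 m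
  have hlen : (PySem.List.pyRange 0 m 1).length ≤ L.length := by
    calc (PySem.List.pyRange 0 m 1).length
        = (PySem.List.pyRange 0 m 1).toFinset.card := (List.toFinset_card_of_nodup hnd).symm
      _ ≤ L.toFinset.card := Finset.card_le_card (by
            intro x hx; simp only [List.mem_toFinset] at hx ⊢; exact hsub hx)
      _ ≤ L.length := L.toFinset_card_le
  rwa [PySem.List.length_pyRange_one, show m - 0 = m by ring] at hlen

-- characterisation: find_mex L = m whenever m is the least nonnegative integer not in L
theorem find_mex_char (L : List Int) (m : Int) (h0 : 0 ≤ m) (h2 : m ∉ L)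
    (hlow : ∀ k, 0 ≤ k → k < m → k ∈ L) : find_mex L = m := by
  have hb : m.toNat ≤ L.length := range_le_length L m h0 hlow
  exact findMexAux_eq L (L.length + 1) 0 m h0 h2 hlow (by omega)

-- find_mex L is itself such a least element
theorem find_mex_spec (L : List Int) :
    0 ≤ find_mex L ∧ find_mex L ∉ L ∧ ∀ k, 0 ≤ k → k < find_mex L → k ∈ L := by
  have hex : ∃ n : Nat, (n : Int) ∉ L := by
    by_contra h
    push_neg at h
    have := range_le_length L (L.length + 1) (by omega) (fun k hk _ => by
      have := h k.toNat
      rwa [Int.toNat_of_nonneg hk] at this)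
    omega
  have hspec := Nat.find_spec hex
  have hmin : ∀ k : Int, 0 ≤ k → k < (Nat.find hex : Int) → k ∈ L := by
    intro k hk1 hk2
    have hk' : k.toNat < Nat.find hex := by omega
    have := Nat.find_min hex hk'
    simp only [not_not] at this
    rwa [Int.toNat_of_nonneg hk1] at this
  have heq : find_mex L = ((Nat.find hex : Nat) : Int) :=
    find_mex_char L _ (Int.natCast_nonneg _) hspec hmin
  rw [heq]
  exact ⟨Int.natCast_nonneg _, hspec, hmin⟩

-- the loop invariant of A: the mex component never changes, used = subseq =
-- the distinct already-seen values above the initial mex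
theorem a_loop_inv (arr : List Int) (m0 : Int) (hpos : 0 ≤ m0) (hnm : m0 ∉ arr)
    (hlow : ∀ k, 0 ≤ k → k < m0 → k ∈ arr) :
    ∀ (l : List Int), (∀ x ∈ l, x ∈ arr) → ∀ (u : List Int), u.Nodup →
      (∀ y ∈ u, m0 < y) →
      ∃ u' : List Int, l.foldl (aStep arr) (u, u, m0) = (u', u', m0) ∧ u'.Nodup ∧
        (∀ y, y ∈ u' ↔ y ∈ u ∨ (y ∈ l ∧ m0 < y)) := by
  intro l
  induction l with
  | nil =>
    intro _ u hnd hgt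
    exact ⟨u, rfl, hnd, by simp⟩
  | cons x l ih =>
    intro hsub u hnd hgt
    by_cases hc : m0 ≤ x ∧ x ∉ u
    · have hxarr : x ∈ arr := hsub x (List.mem_cons_self)
      have hxgt : m0 < x := lt_of_le_of_ne hc.1 (fun h => hnm (h ▸ hxarr))
      have hadd : PySem.Set.add u x = u ++ [x] := PySem.Set.add_of_not_mem hc.2
      have hmex' : find_mex (arr.filter (fun y => decide (y ∉ PySem.Set.add u x))) = m0 := by
        apply find_mex_char _ _ hpos
        · intro h
          exact hnm (List.mem_of_mem_filter h)
        · intro k hk1 hk2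
          rw [List.mem_filter]
          refine ⟨hlow k hk1 hk2, ?_⟩
          rw [hadd]
          simp only [decide_eq_true_eq, List.mem_append, List.mem_cons, List.not_mem_nil,
            or_false]
          rintro (hku | rfl)
          · exact absurd hk2 (not_lt.mpr (le_of_lt (hgt k hku)))
          · omega
      have hstep : aStep arr (u, u, m0) x = (u ++ [x], u ++ [x], m0) := by
        simp only [aStep, if_pos (show m0 ≤ x ∧ x ∉ u from hc)]
        rw [hmex', hadd]
      rw [List.foldl_cons, hstep]
      have hndx : (u ++ [x]).Nodup := by
        rw [List.nodup_append]
        refine ⟨hnd, List.nodup_singleton x, ?_⟩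
        intro a ha b hb hab
        have hbx : b = x := by simpa using hb
        exact hc.2 ((hab.trans hbx) ▸ ha)
      obtain ⟨u', heq, hnd', hmem⟩ := ih (fun y hy => hsub y (List.mem_cons_of_mem _ hy))
        (u ++ [x]) hndx (by
          intro y hy
          rcases List.mem_append.mp hy with hyu | hyx
          · exact hgt y hyu
          · have hyx' : y = x := by simpa using hyx
            rw [hyx']; exact hxgt)
      refine ⟨u', heq, hnd', fun y => ?_⟩
      rw [hmem y]
      simp only [List.mem_append, List.mem_cons, List.not_mem_nil, or_false]
      constructor
      · rintro ((h | rfl) | h)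
        · exact Or.inl h
        · exact Or.inr ⟨Or.inl rfl, hxgt⟩
        · exact Or.inr ⟨Or.inr h.1, h.2⟩
      · rintro (h | ⟨(rfl | h), hgt'⟩)
        · exact Or.inl (Or.inl h)
        · exact Or.inl (Or.inr rfl)
        · exact Or.inr ⟨h, hgt'⟩
    · have hstep : aStep arr (u, u, m0) x = (u, u, m0) := by
        simp only [aStep, if_neg hc]
      rw [List.foldl_cons, hstep]
      obtain ⟨u', heq, hnd', hmem⟩ := ih (fun y hy => hsub y (List.mem_cons_of_mem _ hy)) u hnd hgt
      refine ⟨u', heq, hnd', fun y => ?_⟩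
      rw [hmem y]
      simp only [List.mem_cons]
      constructor
      · rintro (h | h)
        · exact Or.inl h
        · exact Or.inr ⟨Or.inr h.1, h.2⟩
      · rintro (h | ⟨(rfl | h), hgt'⟩)
        · exact Or.inl h
        · push_neg at hc
          exact Or.inl (hc (le_of_lt hgt'))
        · exact Or.inr ⟨h, hgt'⟩

-- ===== VERDICT (by name: the statement is the Claim_ definition above) =====
theorem max_magical_subsequence_spec : Claim_equal_max_magical_subsequence := by
  intro arr _
  unfold Spec_max_magical_subsequence
  obtain ⟨hpos, hnm, hlow⟩ := find_mex_spec arr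
  obtain ⟨u', heq, hnd', hmem⟩ := a_loop_inv arr (find_mex arr) hpos hnm hlow arr
    (fun x hx => hx) [] List.nodup_nil (by simp)
  have hA : max_magical_subsequence arr = (u'.length : Int) := by
    simp only [max_magical_subsequence]
    rw [show (PySem.Set.empty : PySem.Set Int) = ([] : List Int) from rfl, heq]
  have hmemof : ∀ k : Int, k ∈ PySem.Set.ofList arr ↔ k ∈ arr :=
    fun k => PySem.Set.mem_ofList arr k
  have hBmex : altMexLoop (PySem.Set.ofList arr) ((PySem.Set.ofList arr).length + 1) 0
      = find_mex arr := by
    rw [altMexLoop_eq]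
    exact find_mex_char (PySem.Set.ofList arr) (find_mex arr) hpos
      (fun h => hnm ((hmemof _).mp h))
      (fun k hk1 hk2 => (hmemof k).mpr (hlow k hk1 hk2))
  have hB : max_magical_subsequence_alt arr =
      (((PySem.Set.ofList arr).filter (fun v => decide (find_mex arr < v))).length : Int) := by
    simp only [max_magical_subsequence_alt]
    rw [hBmex, List.countP_eq_length_filter]
  have hperm : ((PySem.Set.ofList arr).filter (fun v => decide (find_mex arr < v))).Perm u' := by
    apply (List.perm_ext_iff_of_nodup
      (List.Nodup.filter _ (PySem.Set.nodup_ofList arr)) hnd').mpr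
    intro y
    rw [List.mem_filter, hmem y, hmemof y]
    simp [and_comm]
  rw [hA, hB, hperm.length_eq]
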